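/-
  THE SEGMENTS OF `DGifGetLine` (dgif_lib.c:484-522, 10A1E0H … 10A314H, 81 instructions; contract: Gif/Spec/Lzw.lean): the assertions at
  its cut points, the segment claims, and the COMPOSITION (segments ⇒ the contract), proved here.

      unit                from      to                       instructions   calls
      DGifGetLine.P       10A1E0H   10A230H                            17   —
      DGifGetLine.1       10A230H   10A2C4H | 10A28EH                  31   load8, load4, store4 (the tests; `PixelCount −= LineLen`)
      DGifGetLine.2       10A2C4H   10A2EAH | 10A28EH                  15   DGifDecompressLine; load8
      DGifGetLine.3       10A2EAH   10A2EAH | 10A28EH                  10   DGifGetCodeNext (one round of the flush loop)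
      DGifGetLine.E       10A28EH   ret                                10   —
  (the two instructions 10A305H, 10A308H `mov ebx, r13d ; jmp` are walked by segment 2 and by segment 3: 83 = 81 + 2.)

  THE FRAME (Gif/Frames.lean, c/gif/gif_FRAMES.txt): six pushes (r15 r14 r13 r12 rbp rbx) and `sub rsp, 72`: `rsp = RA − 120` in the
  body; the protected frame's base is `RA − 120`, 64 bytes, the object `Dummy` (8 bytes) at `base + 32 = RA − 88`; `r12` holds the
  shadow index `(RA − 120) >> 3`, `rbp = gif`, `r15 = Line` from the prologue to the epilogue; `r14 = Private` from 10A239H on;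
  `r13d = LineLen` until 10A2D2H, then DGifDecompressLine's result. THE RESULT travels in `ebx` to the epilogue (`mov eax, ebx` at
  10A29AH, after the store that clears the shadow).

  THE FLUSH LOOP l.511-516 `do … while (Dummy != NULL)` contains a contract call: its head 10A2EAH is a cut, measure `rem R v.mem`
  (DGifGetCodeNext's success consumes at least one byte).

  `LZOK` holds at every cut: the function's own store goes to `PixelCount` (`[pv + 56, pv + 64)`), DGifDecompressLine gives `LZOK` back,
  DGifGetCodeNext's footprint misses `[pv + 8, pv + 48)` (`LZOK.frame`).
-/
import Gif.Spec.Lzw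
import Gif.LabelsAt
namespace Gif.Spec
open X86 X86.User Asan ProgX.Base ProgX.Base.Spec

namespace DGifGetLine

/-- The active frames inside the body: the function's own protected frame (`base = RA − 120`), innermost. -/
abbrev framesIn (frames : List (Nat × FrameLayout)) (e : State) : List (Nat × FrameLayout) :=
  ((e.reg .rsp).toNat - 120, Gif.Frames.DGifGetLine) :: frames

/-- **IN THE BODY of `DGifGetLine`**, at the address `cut`, inside the call that was entered at the state `e` (return address `ret`)
with the function's precondition (ghost `n` = `LineLen ≥ 1`): what holds at EVERY cut between the prologue and the `ret`. -/
structure Body (cut : Word) (H : Heap) (rest : List Obj) (frames : List (Nat × FrameLayout)) (F : Forest) (R : Rd) (n : Nat)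
    (u₀ e : State) (ret : Word) (v : State) : Prop where
  /-- the function was entered at `e` … -/
  entry : AtEntry (conv u₀) Gif.L.DGifGetLine.entry (DGifGetLine.spec H rest frames F R n).frame ret e
  /-- … with its precondition -/
  pre : (DGifGetLine.spec H rest frames F R n).pre e
  rip : v.rip = cut
  /-- six pushes and `sub rsp, 72` -/
  rsp : v.reg .rsp = e.reg .rsp - 120
  /-- `mov rbp, rdi` (10A1EEH): `gif` -/
  rbp : v.reg .rbp = e.reg .rdi
  /-- `mov r15, rsi` (10A1F1H): `Line` -/
  r15 : v.reg .r15 = e.reg .rsi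
  /-- `mov r12, rsp ; shr r12, 3` (10A1F7H, 10A214H): the shadow index of the frame; the epilogue's store uses it -/
  r12 : v.reg .r12 = (e.reg .rsp - 120) >>> 3
  /-- the saved registers, in push order (all six callee-saved registers are pushed): the pops 10A2A0H … 10A2A8H restore them -/
  slot_r15 : v.mem.readLE (e.reg .rsp - 8) 8 = (e.reg .r15).toNat
  slot_r14 : v.mem.readLE (e.reg .rsp - 16) 8 = (e.reg .r14).toNat
  slot_r13 : v.mem.readLE (e.reg .rsp - 24) 8 = (e.reg .r13).toNat
  slot_r12 : v.mem.readLE (e.reg .rsp - 32) 8 = (e.reg .r12).toNat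
  slot_rbp : v.mem.readLE (e.reg .rsp - 40) 8 = (e.reg .rbp).toNat
  slot_rbx : v.mem.readLE (e.reg .rsp - 48) 8 = (e.reg .rbx).toNat
  /-- the return-address slot `[RA, RA + 8)` still holds `ret` (no store of the function or of a callee goes there): the `ret`
  at 10A2AAH pops it -/
  slot_ra : UInt64.ofNat (v.mem.readLE (e.reg .rsp) 8) = ret
  /-- the heap's invariant with the OWN frame pushed, the clean stack ending at the present stack pointer -/
  inv : HeapInv H rest (framesIn frames e) ((e.reg .rsp).toNat - 120) v.mem
  /-- the state invariant, same heap, same forest -/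
  ok : GifOK H F R v.mem
  /-- the LZW field ranges: asked at the call of DGifDecompressLine, given back by it, kept by everything else -/
  lz : LZOK v.mem F.pv
  /-- the reader did not go back -/
  rem : rem R v.mem ≤ rem R e.mem
  /-- nothing was written but the function's stack, the frame's 8 shadow bytes and the contract's windows -/
  same : Mem.SameExcept
    [⟨(e.reg .rsp).toNat - 688, (e.reg .rsp).toNat⟩,
     shadowSpan ((e.reg .rsp).toNat - 120) ((e.reg .rsp).toNat - 56),
     ⟨(e.reg .rsi).toNat, (e.reg .rsi).toNat + n⟩,
     ⟨F.pv + 20, F.pv + 64⟩,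
     ⟨F.pv + 88, F.pv + 344⟩,
     ⟨F.pv + 344, F.pv + 4439⟩,
     ⟨F.pv + 4439, F.pv + 8535⟩,
     ⟨F.pv + 8536, F.pv + 24920⟩,
     ⟨F.gif + 96, F.gif + 100⟩,
     ⟨R.cur, R.cur + 8⟩] e.mem v.mem
  code : (conv u₀).code.In v.mem
  abi : (conv u₀).inv v

/-- **AFTER THE PROLOGUE** (at 10A230H, `lea rdi, [rdi + 0x70]`: l.486 `Private = GifFile->Private`): `Body`; `rdi` still holds `gif`;
`r13 = LineLen` (`mov r13d, edx` at 10A1F4H zero-extends: the whole register is `n`). -/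
structure AfterP (H : Heap) (rest : List Obj) (frames : List (Nat × FrameLayout)) (F : Forest) (R : Rd) (n : Nat) (u₀ e : State)
    (ret : Word) (v : State) : Prop where
  body : Body Gif.L.DGifGetLine.at_10a230 H rest frames F R n u₀ e ret v
  /-- the argument register is untouched -/
  rdi : v.reg .rdi = e.reg .rdi
  /-- `r13 = LineLen` -/
  r13 : (v.reg .r13).toNat = n

/-- **BEFORE THE CALL OF DGifDecompressLine** (at 10A2C4H, `mov edx, r13d`: l.504): `Body`; the tests l.488-498 passed and
`Private->PixelCount −= LineLen` (l.502) is stored; `r14 = Private`, `r13 = LineLen`; `rbp = gif` and `r15 = Line` (of `Body`) are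
the other two arguments. -/
structure AtCall (H : Heap) (rest : List Obj) (frames : List (Nat × FrameLayout)) (F : Forest) (R : Rd) (n : Nat) (u₀ e : State)
    (ret : Word) (v : State) : Prop where
  body : Body Gif.L.DGifGetLine.at_10a2c4 H rest frames F R n u₀ e ret v
  /-- `r14 = Private` (10A239H) -/
  r14 : (v.reg .r14).toNat = F.pv
  /-- `r13 = LineLen` -/
  r13 : (v.reg .r13).toNat = n

/-- **AT THE HEAD OF THE FLUSH LOOP l.511** (at 10A2EAH, `lea rsi, [rsp + 0x20]`: `&Dummy`), with the measure `m`: `Body`;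
DGifDecompressLine returned GIF_OK and `r13d` holds it (10A2D2H; 10A305H moves it to `ebx` when the loop ends); `rem R v.mem = m`. -/
structure Head (m : Nat) (H : Heap) (rest : List Obj) (frames : List (Nat × FrameLayout)) (F : Forest) (R : Rd) (n : Nat)
    (u₀ e : State) (ret : Word) (v : State) : Prop where
  body : Body Gif.L.DGifGetLine.at_10a2ea H rest frames F R n u₀ e ret v
  /-- `r13d = GIF_OK`: the function's result when the loop ends with `Dummy = NULL` -/
  r13 : (v.reg .r13).toNat % 2 ^ 32 = 1
  /-- THE MEASURE of the loop: the input bytes left -/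
  measure : Gif.Spec.rem R v.mem = m

/-- **BEFORE THE EPILOGUE** (at 10A28EH, the store that clears the frame's shadow): `Body` (with `LZOK`, for both results), and
the result in `ebx` (the epilogue's second instruction is `mov eax, ebx`): GIF_OK or GIF_ERROR. -/
structure Done (H : Heap) (rest : List Obj) (frames : List (Nat × FrameLayout)) (F : Forest) (R : Rd) (n : Nat) (u₀ e : State)
    (ret : Word) (v : State) : Prop where
  body : Body Gif.L.DGifGetLine.at_10a28e H rest frames F R n u₀ e ret v
  /-- `ebx` = 1 or 0 -/
  res : (v.reg .rbx).toNat % 2 ^ 32 = 1 ∨ (v.reg .rbx).toNat % 2 ^ 32 = 0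

/-- **Segment P** (the prologue, 10A1E0H … 10A230H, 17 instructions): six pushes, `sub rsp, 72`, `rbp = gif`, `r15 = Line`, `r13d =
LineLen`, the frame's three header words, the shadow index in `r12`, the two poison stores. -/
def SegP (Lay : Layout) (μ : Microarch) (u₀ : State) : Prop :=
  ∀ (H : Heap) (rest : List Obj) (frames : List (Nat × FrameLayout)) (F : Forest) (R : Rd) (n : Nat) (e : State) (ret : Word),
    AtEntry (conv u₀) Gif.L.DGifGetLine.entry (DGifGetLine.spec H rest frames F R n).frame ret e →
    (DGifGetLine.spec H rest frames F R n).pre e →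
    ReachVia Lay μ WayInv e (AfterP H rest frames F R n u₀ e ret)

/-- **Segment 1** (the tests, 10A230H … 10A28EH and 10A2ABH … 10A2C4H, 31 instructions, no contract call): the checked loads of
`GifFile->Private` (l.486) and `Private->FileState` (l.488: `IS_READABLE`; its arm l.490 stores `gif.Error`, `ebx = 0`); l.494
`if (!LineLen)` (not taken: `n ≥ 1`; its arm loads `gif.Image.Width`); l.498 `LineLen < 0` (not taken: `n < 2^31`) and the checked load
of `PixelCount`, `PixelCount < LineLen` (unsigned, 64 bits): the arm l.499 stores `gif.Error`, `ebx = 0`, to the epilogue; else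
l.502 the store `PixelCount −= LineLen` (`[pv + 56, pv + 64)`: loose, and off `LZOK`'s window). -/
def Seg1 (Lay : Layout) (μ : Microarch) (u₀ : State) : Prop :=
  ∀ (H : Heap) (rest : List Obj) (frames : List (Nat × FrameLayout)) (F : Forest) (R : Rd) (n : Nat) (e : State) (ret : Word)
    (v : State),
    AfterP H rest frames F R n u₀ e ret v →
    ReachVia Lay μ WayInv v (fun w => AtCall H rest frames F R n u₀ e ret w ∨ Done H rest frames F R n u₀ e ret w)

/-- **Segment 2** (10A2C4H … 10A2EAH, with the two exits 10A305H … 10A314H; 15 instructions): `DGifDecompressLine(gif, Line,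
LineLen)` (l.504: the buffer argument is the entry's, UNCHANGED: its `BufOK` is the precondition's, with one more frame); not GIF_OK:
`ebx = 0`, to the epilogue; else the checked load of `PixelCount` (l.505): not 0: `ebx = r13d = 1`, to the epilogue; 0: to the head
of the flush loop with SOME measure. The saved registers' slots and the frame survive the call: `Line` lies in ONE live object of
`H.liveObjs ++ rest` or of a frame of `frames` (`BufOK.live`), all of which lie at or above the entry's `rsp + 8`. -/
def Seg2 (Lay : Layout) (μ : Microarch) (u₀ : State) : Prop :=
  ∀ (H : Heap) (rest : List Obj) (frames : List (Nat × FrameLayout)) (F : Forest) (R : Rd) (n : Nat) (e : State) (ret : Word)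
    (v : State),
    AtCall H rest frames F R n u₀ e ret v →
    ReachVia Lay μ WayInv v (fun w =>
      (∃ m, Head m H rest frames F R n u₀ e ret w) ∨ Done H rest frames F R n u₀ e ret w)

/-- **Segment 3** (one round of the flush loop, 10A2EAH … 10A30AH, 10 instructions): `DGifGetCodeNext(gif, &Dummy)` (l.512; `Dummy` is
the frame's object: `BufOK` by `Loose.stack`, `HeapWin.offHeap`); GIF_ERROR: `ebx = 0`, to the epilogue; else `Dummy ≠ NULL`
(l.516): back to the head with a SMALLER measure (`rem` went down by at least 1); `Dummy = NULL`: `ebx = r13d = 1`, to the epilogue.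
`LZOK` is kept: DGifGetCodeNext's footprint misses `[pv + 8, pv + 48)`. -/
def Seg3 (Lay : Layout) (μ : Microarch) (u₀ : State) : Prop :=
  ∀ (H : Heap) (rest : List Obj) (frames : List (Nat × FrameLayout)) (F : Forest) (R : Rd) (n : Nat) (e : State) (ret : Word)
    (m : Nat) (v : State),
    Head m H rest frames F R n u₀ e ret v →
    ReachVia Lay μ WayInv v (fun w =>
      (∃ m', m' < m ∧ Head m' H rest frames F R n u₀ e ret w) ∨ Done H rest frames F R n u₀ e ret w)

/-- **Segment E** (the epilogue, 10A28EH … ret, 10 instructions): the 8-byte store that clears the frame's shadow, `mov eax, ebx`,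
`add rsp, 72`, six pops, `ret`. -/
def SegE (Lay : Layout) (μ : Microarch) (u₀ : State) : Prop :=
  ∀ (H : Heap) (rest : List Obj) (frames : List (Nat × FrameLayout)) (F : Forest) (R : Rd) (n : Nat) (e : State) (ret : Word)
    (v : State),
    Done H rest frames F R n u₀ e ret v →
    ReachVia Lay μ WayInv v (Returned (conv u₀) (DGifGetLine.spec H rest frames F R n) e ret)

/-- **The flush loop from its head**, by strong induction on the measure `rem`: to the epilogue's entry. -/
theorem loop_runs {Lay : Layout} {μ : Microarch} {u₀ : State} (h3 : Seg3 Lay μ u₀)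
    (H : Heap) (rest : List Obj) (frames : List (Nat × FrameLayout)) (F : Forest) (R : Rd) (n : Nat) (e : State) (ret : Word) :
    ∀ (m : Nat) (v : State), Head m H rest frames F R n u₀ e ret v →
      ReachVia Lay μ WayInv v (Done H rest frames F R n u₀ e ret) := by
  intro m
  induction m using Nat.strongRecOn with
  | _ m ih =>
    intro v hv
    refine (h3 H rest frames F R n e ret m v hv).trans ?_
    intro w hw
    rcases hw with ⟨m', hlt, hhead⟩ | hdone
    · exact ih m' hlt w hhead
    · exact ReachVia.done hdone

/-- **The composition of `DGifGetLine`**: the prologue, the tests, the call of DGifDecompressLine, the flush loop (an induction on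
its measure), the epilogue chain into the function's contract. -/
theorem compose {Lay : Layout} {μ : Microarch} {u₀ : State} (hP : SegP Lay μ u₀) (h1 : Seg1 Lay μ u₀) (h2 : Seg2 Lay μ u₀)
    (h3 : Seg3 Lay μ u₀) (hE : SegE Lay μ u₀) :
    ∀ (H : Heap) (rest : List Obj) (frames : List (Nat × FrameLayout)) (F : Forest) (R : Rd) (n : Nat),
      Calls Lay μ WayInv (conv u₀) Gif.L.DGifGetLine.entry (DGifGetLine.spec H rest frames F R n) := by
  intro H rest frames F R n e ret he hp
  refine (hP H rest frames F R n e ret he hp).trans ?_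
  intro v hv
  refine (h1 H rest frames F R n e ret v hv).trans ?_
  intro w hw
  rcases hw with hcall | hdone
  · refine (h2 H rest frames F R n e ret w hcall).trans ?_
    intro x hx
    rcases hx with ⟨m, hhead⟩ | hdone
    · refine (loop_runs h3 H rest frames F R n e ret m x hhead).trans ?_
      intro y hy
      exact hE H rest frames F R n e ret y hy
    · exact hE H rest frames F R n e ret x hdone
  · exact hE H rest frames F R n e ret w hdone

end DGifGetLine

end Gif.Spec
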